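-- pv_equiv track=rewrite | github.com/ParkSanggi/algorithm_study | woowa_tech/apply_coupon.py | solution
-- ===== SOURCE A (Python) =====
-- def solution(prices, discounts):
--     answer = 0
--     tmp_prices = sorted(prices)
--     tmp_discounts = sorted(discounts, reverse=True)
--     for discount in tmp_discounts:
--         price = tmp_prices.pop()
--         price -= price * discount // 100
--         answer += price
--     for price in tmp_prices:
--         answer += price
--     return answer
-- ===== SOURCE B (Python) =====
-- def solution(prices, discounts):
--     total = sum(prices)
--     ps = sorted(prices, reverse=True)
--     for i, d in enumerate(sorted(discounts, reverse=True)):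
--         total -= ps[i] * d // 100
--     return total
-- ===== Notes on version B (the rewrite author's own statement) =====
-- stated objective: simpler
-- what changed: B computes sum(prices) once and subtracts each pairwise discount amount ps[i]*d//100 over the descending-sorted lists, instead of A's mutating pop-from-a-sorted-list loop that accumulates discounted prices and then adds the leftover prices in a second loop.
import Mathlib
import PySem

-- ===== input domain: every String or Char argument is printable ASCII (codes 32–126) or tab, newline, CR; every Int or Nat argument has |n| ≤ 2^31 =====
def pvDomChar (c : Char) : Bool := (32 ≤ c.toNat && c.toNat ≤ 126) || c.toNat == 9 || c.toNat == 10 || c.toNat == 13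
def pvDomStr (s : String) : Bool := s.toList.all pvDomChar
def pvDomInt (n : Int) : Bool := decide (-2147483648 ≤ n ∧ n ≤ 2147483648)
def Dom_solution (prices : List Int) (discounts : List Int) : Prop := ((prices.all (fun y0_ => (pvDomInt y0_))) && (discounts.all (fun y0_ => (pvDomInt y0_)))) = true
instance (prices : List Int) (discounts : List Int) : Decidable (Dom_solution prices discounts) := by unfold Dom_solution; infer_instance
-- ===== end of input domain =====

-- B replaces A's "accumulate discounted prices, then add the leftover prices" with
-- "total sum minus each pairwise discount amount" (simpler decomposition; same cost).

-- ===== PORT A =====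
-- the first for-loop of A: for each discount, pop the last (largest) remaining price
def solutionLoopA : List Int → List Int → Int → List Int × Int
  | [], ps, ans => (ps, ans)
  | d :: ds, ps, ans =>
    match PySem.List.pop? ps with
    | none => (ps, ans)          -- IndexError in Python; excluded by Pre_solution
    | some (price, ps') =>
        solutionLoopA ds ps' (ans + (price - PySem.Int.floordiv (price * d) 100))

def solution (prices : List Int) (discounts : List Int) : Int :=
  let tmp_prices := PySem.List.sorted prices (fun x => x) false
  let tmp_discounts := PySem.List.sorted discounts (fun x => x) true
  -- second for-loop of A: answer += price for each remaining price
  (solutionLoopA tmp_discounts tmp_prices 0).1.foldl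
    (fun answer price => answer + price)
    (solutionLoopA tmp_discounts tmp_prices 0).2

-- ===== PORT B =====
-- the loop body of B: total -= ps[i] * d // 100
def stepB (ps : List Int) (total : Int) (q : Int × Int) : Int :=
  match PySem.List.pyGet? ps q.1 with
  | none => total                -- IndexError in Python; excluded by Pre_solution
  | some price => total - PySem.Int.floordiv (price * q.2) 100

def solution_alt (prices : List Int) (discounts : List Int) : Int :=
  let total := prices.foldl (fun a b => a + b) 0      -- sum(prices)
  let ps := PySem.List.sorted prices (fun x => x) true
  (PySem.List.enumerate (PySem.List.sorted discounts (fun x => x) true)).foldl (stepB ps) total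

-- ===== PRECONDITION & SPEC =====
-- Pre_ excludes exactly the inputs with more discounts than prices, where A's pop()
-- (and B's ps[i]) raises IndexError.
def Pre_solution (prices : List Int) (discounts : List Int) : Prop :=
  discounts.length ≤ prices.length
instance (prices : List Int) (discounts : List Int) : Decidable (Pre_solution prices discounts) := by unfold Pre_solution; infer_instance

def pvWitness_solution : List Int × List Int := ([10000, 20000, 30000], [20, 40])

def Spec_solution (prices : List Int) (discounts : List Int) (out : Int) : Prop := out = solution_alt prices discounts
instance (prices : List Int) (discounts : List Int) (out : Int) : Decidable (Spec_solution prices discounts out) := by unfold Spec_solution; infer_instance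

-- ===== CLAIM (what is proved, stated in full; the proofs are below) =====
def Claim_equal_solution : Prop := ∀ (prices : List Int) (discounts : List Int), Dom_solution prices discounts → Pre_solution prices discounts → Spec_solution prices discounts (solution prices discounts)

-- ===== LEMMAS AND PROOFS =====

-- folding (+) from an initial value is that value plus the sum
theorem foldl_add_eq (l : List Int) : ∀ a : Int, l.foldl (fun a b => a + b) a = a + l.sum := by
  induction l with
  | nil => intro a; simp
  | cons x t ih => intro a; simp only [List.foldl_cons, List.sum_cons]; rw [ih]; ring

-- reverse-sorting a list of ints is reversing the ascending sort
theorem sortedRev_eq_reverse (xs : List Int) :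
    PySem.List.sorted xs (fun x => x) true = (PySem.List.sorted xs (fun x => x) false).reverse := by
  have h1 : (PySem.List.sorted xs (fun x => x) true).Perm
      ((PySem.List.sorted xs (fun x => x) false).reverse) :=
    (PySem.List.sorted_perm xs (fun x => x) true).trans
      ((PySem.List.sorted_perm xs (fun x => x) false).symm.trans
        (List.reverse_perm _).symm)
  have h2 : (PySem.List.sorted xs (fun x => x) true).Pairwise (fun a b : Int => b ≤ a) :=
    PySem.List.sorted_pairwise_rev xs (fun x => x)
  have h3 : ((PySem.List.sorted xs (fun x => x) false).reverse).Pairwise (fun a b : Int => b ≤ a) := by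
    rw [List.pairwise_reverse]
    exact PySem.List.sorted_pairwise xs (fun x => x)
  haveI : Std.Antisymm (fun a b : Int => b ≤ a) := ⟨fun a b hab hba => le_antisymm hba hab⟩
  exact List.Perm.eq_of_pairwise' h2 h3 h1

-- B's fold ignores the head of ps when enumeration starts one later
theorem foldB_shift (ds : List Int) (p : Int) (r : List Int) :
    ∀ (s t : Int), 0 ≤ s →
    (PySem.List.enumerate ds (s + 1)).foldl (stepB (p :: r)) t
      = (PySem.List.enumerate ds s).foldl (stepB r) t := by
  induction ds with
  | nil => intro s t _; simp [PySem.List.enumerate_nil]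
  | cons d ds ih =>
    intro s t hs
    rw [PySem.List.enumerate_cons, PySem.List.enumerate_cons,
        List.foldl_cons, List.foldl_cons]
    have hget : PySem.List.pyGet? (p :: r) (s + 1) = PySem.List.pyGet? r s := by
      rw [PySem.List.pyGet?_of_nonneg (p :: r) (show (0:Int) ≤ s + 1 by omega),
          PySem.List.pyGet?_of_nonneg r hs]
      have h1 : (s + 1).toNat = s.toNat + 1 := by omega
      rw [h1]
      simp
    have hstep : stepB (p :: r) t (s + 1, d) = stepB r t (s, d) := by
      simp only [stepB]
      rw [hget]
    rw [hstep]
    exact ih (s + 1) _ (by omega)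

-- main correspondence: A's loop on r.reverse (pop from the back = consume r front-first,
-- then add the leftovers) against B's indexed fold over r starting from the full sum
theorem loop_eq (ds : List Int) :
    ∀ (r : List Int) (ans : Int), ds.length ≤ r.length →
    (solutionLoopA ds r.reverse ans).1.foldl (fun answer price => answer + price)
        (solutionLoopA ds r.reverse ans).2
      = (PySem.List.enumerate ds 0).foldl (stepB r) (ans + r.foldl (fun a b => a + b) 0) := by
  induction ds with
  | nil =>
    intro r ans _
    simp only [solutionLoopA, PySem.List.enumerate_nil, List.foldl_nil]
    rw [foldl_add_eq, foldl_add_eq, List.sum_reverse]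
    ring
  | cons d ds ih =>
    intro r ans hlen
    cases r with
    | nil => simp at hlen
    | cons p r' =>
      have h' : ds.length ≤ r'.length := by
        simp only [List.length_cons] at hlen; omega
      rw [List.reverse_cons]
      simp only [solutionLoopA]
      rw [PySem.List.pop?_last]
      rw [ih r' (ans + (p - PySem.Int.floordiv (p * d) 100)) h']
      rw [PySem.List.enumerate_cons, List.foldl_cons]
      have hstep0 : stepB (p :: r')
          (ans + (p :: r').foldl (fun a b => a + b) 0) ((0 : Int), d)
          = ans + (p :: r').foldl (fun a b => a + b) 0
              - PySem.Int.floordiv (p * d) 100 := by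
        simp only [stepB]
        rw [PySem.List.pyGet?_zero_cons]
      rw [hstep0, foldB_shift ds p r' 0 _ le_rfl]
      congr 1
      rw [foldl_add_eq, foldl_add_eq, List.sum_cons]
      ring

theorem solution_eq_alt : ∀ (prices discounts : List Int),
    Pre_solution prices discounts → solution prices discounts = solution_alt prices discounts := by
  intro prices discounts hpre
  unfold Pre_solution at hpre
  have hrev : (PySem.List.sorted prices (fun x => x) true).reverse
      = PySem.List.sorted prices (fun x => x) false := by
    rw [sortedRev_eq_reverse, List.reverse_reverse]
  have hlen : (PySem.List.sorted discounts (fun x => x) true).length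
      ≤ (PySem.List.sorted prices (fun x => x) true).length := by
    rw [PySem.List.length_sorted, PySem.List.length_sorted]
    exact hpre
  unfold solution solution_alt
  rw [← hrev]
  rw [loop_eq _ _ 0 hlen]
  congr 1
  rw [foldl_add_eq, foldl_add_eq]
  have hsum : (PySem.List.sorted prices (fun x => x) true).sum = prices.sum :=
    (PySem.List.sorted_perm prices (fun x => x) true).sum_eq
  rw [hsum]
  ring

-- ===== VERDICT (by name: the statement is the Claim_ definition above) =====
theorem solution_spec : Claim_equal_solution := by
  intro prices discounts _ hpre
  unfold Spec_solution
  exact solution_eq_alt prices discounts hpre
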